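-- pv_equiv track=rewrite | github.com/Tippman/basics-of-python | lesson_4_hm/task_6.py | cycle_from_list
-- ===== SOURCE A (Python) =====
-- from itertools import count, cycle
--
-- def cycle_from_list(some_list, count_f):
--     """Выводит каждый элемент строки в список нужное количество раз"""
--     break_point = 0
--     res = []
--     for f in cycle(some_list):
--         if break_point > count_f:
--             break
--         else:
--             break_point += 1
--         res.append(f)
--     return res
-- ===== SOURCE B (Python) =====
-- def cycle_from_list(some_list, count_f):
--     """Выводит каждый элемент строки в список нужное количество раз"""
--     k = count_f + 1
--     if k <= 0 or not some_list:
--         return []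
--     q, r = divmod(k, len(some_list))
--     return some_list * q + some_list[:r]
-- ===== Notes on version B (the rewrite author's own statement) =====
-- stated objective: simpler
-- what changed: Replaces the cycle()/counter/break loop with a closed form: divmod(count_f+1, len) gives q full copies of the list (list multiplication) plus a slice of the first r elements, with the empty-list and non-positive-count cases returned directly.
import Mathlib
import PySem

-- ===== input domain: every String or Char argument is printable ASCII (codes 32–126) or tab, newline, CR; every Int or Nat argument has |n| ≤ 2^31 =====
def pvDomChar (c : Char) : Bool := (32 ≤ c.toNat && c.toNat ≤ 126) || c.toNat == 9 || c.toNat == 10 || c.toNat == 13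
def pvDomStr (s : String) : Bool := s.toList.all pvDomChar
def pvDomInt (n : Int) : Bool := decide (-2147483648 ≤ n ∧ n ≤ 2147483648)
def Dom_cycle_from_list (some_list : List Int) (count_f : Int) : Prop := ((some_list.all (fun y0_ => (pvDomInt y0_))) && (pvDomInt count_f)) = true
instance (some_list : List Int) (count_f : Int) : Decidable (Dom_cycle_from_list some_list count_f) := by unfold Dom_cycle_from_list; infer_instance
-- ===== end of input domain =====

-- B replaces the cycle()/counter/break loop by a closed form: replicate the list count_f+1 times and slice the first count_f+1 elements (simpler, no explicit loop).


-- ===== PORT A =====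
-- A's 'for f in cycle(some_list)' is a loop over the elements at cyclic index i;
-- for an empty list cycle() yields nothing, so the loop body never runs.
def cycleLoopA (l : List Int) (count_f : Int) (bp : Int) (res : List Int) (i : Nat) : List Int :=
  if bp > count_f then res
  else cycleLoopA l count_f (bp + 1) (res ++ [l.getD i 0]) ((i + 1) % l.length)
termination_by (count_f + 1 - bp).toNat
decreasing_by omega

def cycle_from_list (some_list : List Int) (count_f : Int) : List Int :=
  if some_list = [] then [] else cycleLoopA some_list count_f 0 [] 0

-- ===== PORT B =====
-- Python 'l * q' (q ≥ 0 here) is (List.replicate q.toNat l).flatten; '[:r]' is slice; divmod via PySem.Int.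
def cycle_from_list_alt (some_list : List Int) (count_f : Int) : List Int :=
  if count_f + 1 ≤ 0 ∨ some_list = [] then []
  else
    (List.replicate (PySem.Int.floordiv (count_f + 1) (some_list.length : Int)).toNat some_list).flatten
      ++ PySem.List.slice some_list none (some (PySem.Int.mod (count_f + 1) (some_list.length : Int)))

-- ===== PRECONDITION & SPEC =====
def Spec_cycle_from_list (some_list : List Int) (count_f : Int) (out : List Int) : Prop := out = cycle_from_list_alt some_list count_f
instance (some_list : List Int) (count_f : Int) (out : List Int) : Decidable (Spec_cycle_from_list some_list count_f out) := by unfold Spec_cycle_from_list; infer_instance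

-- ===== CLAIM (what is proved, stated in full; the proofs are below) =====
def Claim_equal_cycle_from_list : Prop := ∀ (some_list : List Int) (count_f : Int), Dom_cycle_from_list some_list count_f → Spec_cycle_from_list some_list count_f (cycle_from_list some_list count_f)

-- ===== LEMMAS AND PROOFS =====

-- the sequence of elements A collects: n elements of l cycling from index i
def cyc (l : List Int) : Nat → Nat → List Int
  | 0, _ => []
  | n + 1, i => l.getD i 0 :: cyc l n ((i + 1) % l.length)

theorem cycleLoopA_eq (l : List Int) (count_f : Int) :
    ∀ (n : Nat) (bp : Int) (res : List Int) (i : Nat),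
      (count_f + 1 - bp).toNat = n →
      cycleLoopA l count_f bp res i = res ++ cyc l n i := by
  intro n
  induction n with
  | zero =>
    intro bp res i h
    rw [cycleLoopA]
    simp only [cyc, List.append_nil]
    rw [if_pos (by omega)]
  | succ n ih =>
    intro bp res i h
    rw [cycleLoopA, if_neg (by omega)]
    rw [ih (bp + 1) _ _ (by omega)]
    simp [cyc]

theorem cyc_eq (l : List Int) (hl : l ≠ []) :
    ∀ (n : Nat) (i : Nat), i < l.length →
      cyc l n i = List.take n (l.drop i ++ (List.replicate n l).flatten) := by
  intro n
  induction n with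
  | zero => intro i _; simp [cyc]
  | succ n ih =>
    intro i hi
    have hdrop : l.drop i = l[i] :: l.drop (i + 1) := List.drop_eq_getElem_cons hi
    have hlen : 1 ≤ l.length := by
      cases l with
      | nil => exact absurd rfl hl
      | cons a t => simp
    have hflat : (List.replicate (n + 1) l).flatten = (List.replicate n l).flatten ++ l := by
      rw [List.replicate_succ' (n := n), List.flatten_append]; simp
    rw [hdrop]
    simp only [cyc, List.cons_append, List.take_succ_cons]
    congr 1
    · simp [List.getD_eq_getElem?_getD, hi]
    · by_cases hcase : i + 1 < l.length
      · rw [Nat.mod_eq_of_lt hcase, ih (i + 1) hcase, hflat, ← List.append_assoc]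
        have hle : n ≤ (List.drop (i + 1) l ++ (List.replicate n l).flatten).length := by
          simp only [List.length_append, List.length_drop, List.length_flatten,
            List.map_replicate, List.sum_replicate, smul_eq_mul]
          calc n ≤ n * l.length := Nat.le_mul_of_pos_right n (by omega)
            _ ≤ l.length - (i + 1) + n * l.length := by omega
        rw [List.take_append_of_le_length hle]
      · have hi1 : i + 1 = l.length := by omega
        rw [hi1, Nat.mod_self, ih 0 (by omega), List.drop_length, List.nil_append,
          List.drop_zero]
        have hflat' : (List.replicate (n + 1) l).flatten = l ++ (List.replicate n l).flatten := by
          rw [List.replicate_succ, List.flatten_cons]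
        rw [hflat']

theorem flatten_replicate_succ_eq (l : List Int) (n : Nat) :
    l ++ (List.replicate n l).flatten = (List.replicate n l).flatten ++ l := by
  rw [← List.flatten_cons, ← List.replicate_succ, List.replicate_succ', List.flatten_append,
    List.flatten_cons, List.flatten_nil, List.append_nil]

theorem flatten_replicate_cons (l : List Int) (n : Nat) :
    (List.replicate (n + 1) l).flatten = l ++ (List.replicate n l).flatten := by
  rw [List.replicate_succ, List.flatten_cons]

theorem take_flatten_replicate (l : List Int) (hl : l ≠ []) :
    ∀ (q m r : Nat), r < l.length → q * l.length + r ≤ m * l.length →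
      List.take (q * l.length + r) (List.replicate m l).flatten
        = (List.replicate q l).flatten ++ List.take r l := by
  have hn : 1 ≤ l.length := by
    cases l with
    | nil => exact absurd rfl hl
    | cons a t => simp
  intro q
  induction q with
  | zero =>
    intro m r hr hle
    simp only [Nat.zero_mul, Nat.zero_add, List.replicate_zero, List.flatten_nil,
      List.nil_append]
    rcases Nat.eq_zero_or_pos r with hr0 | hr0
    · simp [hr0]
    · have hm : 1 ≤ m := by
        rcases Nat.eq_zero_or_pos m with hm0 | hm0
        · subst hm0; simp at hle; omega
        · exact hm0
      obtain ⟨m', rfl⟩ : ∃ m', m = m' + 1 := ⟨m - 1, by omega⟩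
      rw [flatten_replicate_cons, List.take_append_of_le_length (by omega)]
  | succ q ih =>
    intro m r hr hle
    have hm : 1 ≤ m := by
      rcases Nat.eq_zero_or_pos m with hm0 | hm0
      · subst hm0
        simp only [Nat.zero_mul, Nat.le_zero] at hle
        have h1 : (q + 1) * l.length = q * l.length + l.length := by ring
        omega
      · exact hm0
    obtain ⟨m', rfl⟩ : ∃ m', m = m' + 1 := ⟨m - 1, by omega⟩
    have hle' : q * l.length + r ≤ m' * l.length := by
      have h1 : (q + 1) * l.length = q * l.length + l.length := by ring
      have h2 : (m' + 1) * l.length = m' * l.length + l.length := by ring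
      omega
    have hsplit : (q + 1) * l.length + r = l.length + (q * l.length + r) := by
      have h1 : (q + 1) * l.length = q * l.length + l.length := by ring
      omega
    rw [hsplit, flatten_replicate_cons, List.take_append,
      List.take_of_length_le (by simp), Nat.add_sub_cancel_left,
      flatten_replicate_cons, ih m' r hr hle', List.append_assoc]

-- ===== VERDICT (by name: the statement is the Claim_ definition above) =====
theorem cycle_from_list_spec : Claim_equal_cycle_from_list := by
  intro l count_f _
  unfold Spec_cycle_from_list cycle_from_list cycle_from_list_alt
  by_cases hl : l = []
  · subst hl
    simp
  · rw [if_neg hl]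
    have hlen : 1 ≤ l.length := by
      cases l with
      | nil => exact absurd rfl hl
      | cons a t => simp
    by_cases hc : count_f + 1 ≤ 0
    · rw [cycleLoopA_eq l count_f 0 0 [] 0 (by omega), List.nil_append]
      simp [cyc, hc]
    · rw [if_neg (by simp [hc, hl])]
      have hnpos : (0 : Int) < (l.length : Int) := by exact_mod_cast hlen
      set k : Int := count_f + 1 with hk
      set q : Int := PySem.Int.floordiv k (l.length : Int) with hqdef
      set r : Int := PySem.Int.mod k (l.length : Int) with hrdef
      have hr0 : 0 ≤ r := PySem.Int.mod_nonneg k hnpos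
      have hrlt : r < (l.length : Int) := PySem.Int.mod_lt k hnpos
      have hq0 : 0 ≤ q := by
        rw [hqdef, PySem.Int.floordiv_eq_ediv_of_pos hnpos]
        exact Int.ediv_nonneg (by omega) (by omega)
      have hid : q * (l.length : Int) + r = k := PySem.Int.floordiv_mul_add_mod k (l.length : Int)
      set N := k.toNat with hN
      -- A's value: the first N elements cycled from index 0
      rw [cycleLoopA_eq l count_f N 0 [] 0 (by omega), List.nil_append]
      rw [cyc_eq l hl N 0 (by omega), List.drop_zero]
      rw [flatten_replicate_succ_eq]
      rw [List.take_append_of_le_length (by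
        simp only [List.length_flatten, List.map_replicate, List.sum_replicate, smul_eq_mul]
        exact Nat.le_mul_of_pos_right N (by omega))]
      -- N = q.toNat * len + r.toNat
      have hNdecomp : N = q.toNat * l.length + r.toNat := by
        have hcast : ((q.toNat * l.length + r.toNat : Nat) : Int) = k := by
          push_cast
          rw [Int.toNat_of_nonneg hq0, Int.toNat_of_nonneg hr0]
          exact hid
        omega
      rw [hNdecomp,
        take_flatten_replicate l hl q.toNat (q.toNat * l.length + r.toNat) r.toNat (by omega)
          (Nat.le_mul_of_pos_right _ (by omega))]
      rw [PySem.List.slice_to l hr0]
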